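-- pv_equiv track=rewrite | github.com/Joshua992700/ESEC-Portal | is_sum_odd_or_even.py | is_sum_odd_or_even
-- ===== SOURCE A (Python) =====
-- def is_sum_odd_or_even(strings, m):
--     total_sum = 0
--
--     for s in strings:
--         value = 1
--         for char in s:
--             ord_value = ord(char)
--             value *= ord_value ** m
--         total_sum += value
--
--     return "ODD" if total_sum % 2 != 0 else "EVEN"
-- ===== SOURCE B (Python) =====
-- def is_sum_odd_or_even(strings, m):
--     # Parity only: ord(c)**m is odd iff m == 0 or ord(c) is odd, so each
--     # string contributes an odd value iff m == 0 or all its chars are odd.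
--     count = sum(1 for s in strings if m == 0 or all(ord(c) % 2 == 1 for c in s))
--     return "ODD" if count % 2 == 1 else "EVEN"
-- ===== Notes on version B (the rewrite author's own statement) =====
-- stated objective: faster
-- what changed: Replaces big-integer exponentiation and product/sum accumulation by a single pass counting (mod 2) the strings whose characters all have odd codes, since ord(c)**m is odd iff m==0 or ord(c) is odd.
-- outside the precondition, e.g. on is_sum_odd_or_even(['b'], -1): A returns 'ODD', B returns 'EVEN'
import Mathlib
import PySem

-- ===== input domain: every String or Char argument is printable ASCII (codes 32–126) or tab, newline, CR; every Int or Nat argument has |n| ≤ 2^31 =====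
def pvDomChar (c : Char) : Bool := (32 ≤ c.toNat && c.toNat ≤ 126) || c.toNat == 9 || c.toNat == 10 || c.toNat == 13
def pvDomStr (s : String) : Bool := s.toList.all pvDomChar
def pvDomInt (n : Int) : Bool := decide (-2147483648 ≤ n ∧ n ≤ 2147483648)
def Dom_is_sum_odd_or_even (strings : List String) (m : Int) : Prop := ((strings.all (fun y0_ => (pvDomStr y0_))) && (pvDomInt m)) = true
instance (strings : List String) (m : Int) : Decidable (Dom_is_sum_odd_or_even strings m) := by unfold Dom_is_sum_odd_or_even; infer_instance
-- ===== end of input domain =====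

-- B replaces A's big-integer exponentiation/product with a single pass counting (mod 2)
-- the strings whose characters all have odd codes (ord(c)**m is odd iff m == 0 or ord(c) odd).


-- ===== PORT A =====
-- Literal port: total_sum accumulates, per string value accumulates products of ord(char)**m.
-- (m.toNat is the exponent, exact on Pre_ which requires 0 ≤ m.)
def is_sum_odd_or_even (strings : List String) (m : Int) : String :=
  let total_sum : Int :=
    strings.foldl (fun total_sum s =>
      let value : Int :=
        s.toList.foldl (fun value char =>
          let ord_value : Int := (char.toNat : Int)
          value * ord_value ^ m.toNat) 1
      total_sum + value) 0
  if total_sum % 2 ≠ 0 then "ODD" else "EVEN"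

-- ===== PORT B =====
def is_sum_odd_or_even_alt (strings : List String) (m : Int) : String :=
  let count : Int :=
    strings.foldl (fun count s =>
      if m == 0 || s.toList.all (fun c => (c.toNat : Int) % 2 == 1) then count + 1 else count) 0
  if count % 2 == 1 then "ODD" else "EVEN"

-- ===== PRECONDITION & SPEC =====
-- Pre_ excludes negative m, where Python evaluates ord(char) ** m in floating point
-- (non-integer semantics); A's result there is a float-arithmetic accident.
def Pre_is_sum_odd_or_even (strings : List String) (m : Int) : Prop := 0 ≤ m
instance (strings : List String) (m : Int) : Decidable (Pre_is_sum_odd_or_even strings m) := by unfold Pre_is_sum_odd_or_even; infer_instance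
def pvWitness_is_sum_odd_or_even : List String × Int := (["ab", "cd"], 3)
def Spec_is_sum_odd_or_even (strings : List String) (m : Int) (out : String) : Prop := out = is_sum_odd_or_even_alt strings m
instance (strings : List String) (m : Int) (out : String) : Decidable (Spec_is_sum_odd_or_even strings m out) := by unfold Spec_is_sum_odd_or_even; infer_instance

-- ===== CLAIM (what is proved, stated in full; the proofs are below) =====
def Claim_equal_is_sum_odd_or_even : Prop := ∀ (strings : List String) (m : Int), Dom_is_sum_odd_or_even strings m → Pre_is_sum_odd_or_even strings m → Spec_is_sum_odd_or_even strings m (is_sum_odd_or_even strings m)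

-- ===== LEMMAS AND PROOFS =====

-- foldl-of-multiplication pulls out its accumulator
theorem pv_foldl_mul (k : Nat) (l : List Char) (a : Int) :
    l.foldl (fun v c => v * (c.toNat : Int) ^ k) a
      = a * l.foldl (fun v c => v * (c.toNat : Int) ^ k) 1 := by
  induction l generalizing a with
  | nil => simp
  | cons c t ih =>
    simp only [List.foldl_cons]
    rw [ih (a * _), ih (1 * _)]
    ring

-- parity of a positive power
theorem pv_pow_parity (x : Int) : ∀ k : Nat, 1 ≤ k → x ^ k % 2 = x % 2 := by
  intro k
  induction k with
  | zero => omega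
  | succ n ih =>
    intro _
    rcases Nat.eq_zero_or_pos n with hn | hn
    · subst hn; simp
    · rw [pow_succ, Int.mul_emod, ih hn]
      rcases Int.emod_two_eq_zero_or_one x with h | h <;> simp [h]

-- parity of one string's value
theorem pv_val_parity (k : Nat) (l : List Char) :
    (l.foldl (fun v c => v * (c.toNat : Int) ^ k) 1) % 2
      = (if k == 0 || l.all (fun c => (c.toNat : Int) % 2 == 1) then 1 else 0) := by
  induction l with
  | nil => simp
  | cons c t ih =>
    simp only [List.foldl_cons, one_mul, List.all_cons]
    rw [pv_foldl_mul]
    rcases Nat.eq_zero_or_pos k with hk | hk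
    · subst hk; simp [ih]
    · have hk0 : (k == 0) = false := by simp; omega
      rw [Int.mul_emod, pv_pow_parity _ k hk, ih]
      simp only [hk0, Bool.false_or]
      rcases Int.emod_two_eq_zero_or_one (c.toNat : Int) with h | h
      · simp [h]
      · by_cases ha : t.all (fun c => (c.toNat : Int) % 2 == 1) <;> simp [h, ha]

-- outer accumulation: total parity = count parity
theorem pv_outer (m : Int) (hm0 : 0 ≤ m) (strings : List String) (a b : Int)
    (hab : a % 2 = b % 2) :
    (strings.foldl (fun total_sum s =>
        total_sum + s.toList.foldl (fun v c => v * (c.toNat : Int) ^ m.toNat) 1) a) % 2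
      = (strings.foldl (fun count s =>
          if m == 0 || s.toList.all (fun c => (c.toNat : Int) % 2 == 1) then count + 1 else count) b) % 2 := by
  induction strings generalizing a b with
  | nil => simpa using hab
  | cons s t ih =>
    simp only [List.foldl_cons]
    have hv := pv_val_parity m.toNat s.toList
    have hb : (m.toNat == 0) = (m == 0) := by
      by_cases hm : m = 0
      · subst hm; simp
      · have h1 : m.toNat ≠ 0 := by omega
        simp [hm, h1]
    rw [hb] at hv
    apply ih
    by_cases hc : (m == 0 || s.toList.all (fun c => (c.toNat : Int) % 2 == 1)) = true
    · rw [if_pos hc] at hv ⊢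
      omega
    · rw [if_neg (by simpa using hc)] at hv
      rw [if_neg (by simpa using hc)]
      omega

-- ===== VERDICT (by name: the statement is the Claim_ definition above) =====
theorem is_sum_odd_or_even_spec : Claim_equal_is_sum_odd_or_even := by
  intro strings m _ hpre
  unfold Spec_is_sum_odd_or_even is_sum_odd_or_even is_sum_odd_or_even_alt
  simp only []
  have h := pv_outer m hpre strings 0 0 rfl
  rw [h]
  set c := strings.foldl (fun count s =>
    if m == 0 || s.toList.all (fun c => (c.toNat : Int) % 2 == 1) then count + 1 else count) 0
  rcases Int.emod_two_eq_zero_or_one c with hc | hc <;> simp [hc]
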